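-- pv_equiv track=rewrite | github.com/rbachati/dna_sequence_alignment | similarityalgo.py | calculate_best_shift
-- ===== SOURCE A (Python) =====
-- def identify_chained_sequences(sequence1, sequence2):
--     chained_sequences = []
--     chain = ""
--     for a, b in zip(sequence1, sequence2):
--         if a == b:
--             chain += a
--         else:
--             if chain:
--                 chained_sequences.append(chain)
--                 chain = ""
--     if chain: # if the chain extends to the end
--         chained_sequences.append(chain)
--     return chained_sequences
--
-- def calculate_best_shift(sequence1, sequence2, max_shift):
--     best_shift = 0
--     best_matches = count_matches_without_shift(sequence1, sequence2)  # Start with no shift matches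
--     best_chain = max(identify_chained_sequences(sequence1, sequence2), key=len, default="")
--     best_chained_sequences = identify_chained_sequences(sequence1, sequence2)
--
--     for shift in range(1, max_shift + 1):  # Start from 1 since we already considered shift = 0
--         sequence2_shifted = sequence2[-shift:] + sequence2[:-shift]
--
--         current_matches = sum(1 for a, b in zip(sequence1, sequence2_shifted) if a == b)
--         current_chained_sequences = identify_chained_sequences(sequence1, sequence2_shifted)
--         current_chain = max(current_chained_sequences, key=len, default="")
--
--         if current_matches > best_matches or (current_matches == best_matches and len(current_chain) > len(best_chain)):
--             best_shift = shift
--             best_matches = current_matches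
--             best_chain = current_chain
--             best_chained_sequences = current_chained_sequences
--
--     return best_shift, best_matches, best_chain, best_chained_sequences
--
-- def count_matches_without_shift(sequence1, sequence2):
--     return sum(1 for a, b in zip(sequence1, sequence2) if a == b)
-- ===== SOURCE B (Python) =====
-- def _runs(pairs):
--     # contiguous matching runs, built back-to-front in one pass
--     out = []
--     prev = False
--     for a, b in reversed(pairs):
--         if a == b:
--             if prev:
--                 out[0] = a + out[0]
--             else:
--                 out.insert(0, a)
--             prev = True
--         else:
--             prev = False
--     return out
--
-- def calculate_best_shift(sequence1, sequence2, max_shift):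
--     n2 = len(sequence2)
--     last = max_shift if max_shift > 0 else 0
--     # phase 1: per-shift match counts by modular indexing (no rotated strings);
--     # shifts s >= n2 clamp to the identity rotation, so only min(last+1, n2)
--     # residues are ever counted
--     if n2 == 0:
--         matches = [0] * (last + 1)
--     else:
--         nres = min(last + 1, n2)
--         votes = [0] * nres
--         for i in range(min(len(sequence1), n2)):
--             c = sequence1[i]
--             for r in range(nres):
--                 if c == sequence2[(i - r) % n2]:
--                     votes[r] += 1
--         matches = [votes[s] if s < n2 else votes[0] for s in range(last + 1)]
--     best_matches = max(matches)
--     # phase 2: build runs only for shifts achieving best_matches;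
--     # the first one with the longest chain wins
--     best = None
--     for s in range(last + 1):
--         if matches[s] != best_matches:
--             continue
--         shifted = sequence2[-s:] + sequence2[:-s]
--         runs = _runs(list(zip(sequence1, shifted)))
--         chain = max(runs, key=len, default="")
--         if best is None or len(chain) > len(best[2]):
--             best = (s, best_matches, chain, runs)
--     return best
-- ===== Notes on version B (the rewrite author's own statement) =====
-- stated objective: alternative
-- what changed: B is a two-phase algorithm: phase 1 counts matches for every shift at once by modular indexing into the unrotated string (votes per rotation residue, with shifts >= len(seq2) clamping to residue 0), never building a rotated string for counting; phase 2 takes the maximal count and builds the matching runs (back-to-front, in one pass) only for the shifts that achieve it, picking the first one with the longest run, whereas A rotates, rescans and re-identifies chains for every single shift inside one sequential best-so-far loop.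
import Mathlib
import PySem

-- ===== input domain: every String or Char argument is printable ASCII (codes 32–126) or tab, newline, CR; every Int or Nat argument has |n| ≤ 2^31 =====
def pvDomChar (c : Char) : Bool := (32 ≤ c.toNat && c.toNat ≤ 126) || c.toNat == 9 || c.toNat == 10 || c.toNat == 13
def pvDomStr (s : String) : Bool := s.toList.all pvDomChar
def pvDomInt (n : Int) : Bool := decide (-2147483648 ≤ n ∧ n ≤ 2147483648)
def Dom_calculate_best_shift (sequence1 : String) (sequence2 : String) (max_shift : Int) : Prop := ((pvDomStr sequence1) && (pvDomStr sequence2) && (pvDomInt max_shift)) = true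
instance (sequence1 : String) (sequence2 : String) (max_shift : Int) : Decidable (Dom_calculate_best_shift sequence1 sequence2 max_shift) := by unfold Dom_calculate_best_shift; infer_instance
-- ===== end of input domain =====

-- B replaces A's per-shift rotate-and-scan by a two-phase algorithm: phase 1 counts
-- matches per rotation residue by modular indexing (no rotated strings), phase 2
-- builds the match runs only for the shifts achieving the maximal count
-- (objective: alternative algorithm, not claimed faster).

-- ===== PORT A =====
-- sum(1 for a, b in zip(...) if a == b)
def pvCountMatches (l : List (Char × Char)) : Int :=
  l.foldl (fun acc p => if p.1 = p.2 then acc + 1 else acc) 0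

-- the body of A's identify_chained_sequences loop (state: collected chains, current chain)
def pvIdentStep (st : List (List Char) × List Char) (p : Char × Char) : List (List Char) × List Char :=
  if p.1 = p.2 then (st.1, st.2 ++ [p.1])
  else if st.2 ≠ [] then (st.1 ++ [st.2], []) else st

def pvIdentify (l : List (Char × Char)) : List (List Char) :=
  let st := l.foldl pvIdentStep ([], [])
  if st.2 ≠ [] then st.1 ++ [st.2] else st.1

-- one iteration of A's for-loop over shift
def pvStepA (l1 l2 : List Char) (st : Int × Int × List Char × List (List Char)) (shift : Int) :
    Int × Int × List Char × List (List Char) :=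
  let shifted := PySem.List.slice l2 (some (-shift)) none ++ PySem.List.slice l2 none (some (-shift))
  let pz := l1.zip shifted
  let cm := pvCountMatches pz
  let crs := pvIdentify pz
  let cc := PySem.List.maxD crs List.length []
  if cm > st.2.1 ∨ (cm = st.2.1 ∧ cc.length > st.2.2.1.length) then (shift, cm, cc, crs) else st

def calculate_best_shift (sequence1 : String) (sequence2 : String) (max_shift : Int) :
    Int × Int × String × List String :=
  let l1 := sequence1.toList
  let l2 := sequence2.toList
  let p0 := l1.zip l2
  let bm0 := pvCountMatches p0
  let bc0 := PySem.List.maxD (pvIdentify p0) List.length []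
  let rs0 := pvIdentify p0
  let fin := (PySem.List.pyRange 1 (max_shift + 1) 1).foldl (pvStepA l1 l2) (0, bm0, bc0, rs0)
  (fin.1, fin.2.1, String.ofList fin.2.2.1, fin.2.2.2.map String.ofList)

-- ===== PORT B =====
-- B's _runs: back-to-front pass (structural recursion = Python's loop over reversed(pairs));
-- the Bool is 'prev' (did the pair just to the right match?)
def pvRunsAux : List (Char × Char) → List (List Char) × Bool
  | [] => ([], false)
  | p :: t =>
    let r := pvRunsAux t
    if p.1 = p.2 then
      match r with
      | (c :: cs, true) => ((p.1 :: c) :: cs, true)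
      | (out, _) => ([p.1] :: out, true)
    else (r.1, false)

-- B's phase-1 vote pass: votes[r] += 1 whenever sequence1[i] == sequence2[(i-r) % n2]
-- (indices are provably in range, so xs[i] is pyGet? ….getD / pyGetD, pySetD)
def pvVotes (l1 l2 : List Char) (nres : Int) : List Int :=
  (PySem.List.pyRange 0 (min (l1.length : Int) (l2.length : Int)) 1).foldl
    (fun v i =>
      let c := (PySem.List.pyGet? l1 i).getD ' '
      (PySem.List.pyRange 0 nres 1).foldl
        (fun v r =>
          if c = (PySem.List.pyGet? l2 (PySem.Int.mod (i - r) (l2.length : Int))).getD ' '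
          then PySem.List.pySetD v r (PySem.List.pyGetD v r 0 + 1) else v)
        v)
    (List.replicate nres.toNat 0)

-- one iteration of B's phase-2 loop (best is an Option, None before the first candidate)
def pvStepB (l1 l2 : List Char) (mlist : List Int) (m : Int)
    (best : Option (Int × Int × List Char × List (List Char))) (s : Int) :
    Option (Int × Int × List Char × List (List Char)) :=
  if PySem.List.pyGetD mlist s 0 ≠ m then best
  else
    let shifted := PySem.List.slice l2 (some (-s)) none ++ PySem.List.slice l2 none (some (-s))
    let runs := (pvRunsAux (l1.zip shifted)).1
    let chain := PySem.List.maxD runs List.length []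
    match best with
    | none => some (s, m, chain, runs)
    | some b => if chain.length > b.2.2.1.length then some (s, m, chain, runs) else some b

-- B's match table: phase 1 of Source B (the vote pass and the per-shift comprehension)
def pvMatchList (l1 l2 : List Char) (last : Int) : List Int :=
  if (l2.length : Int) = 0 then List.replicate (last + 1).toNat 0
  else
    (PySem.List.pyRange 0 (last + 1) 1).map
      (fun s => if s < (l2.length : Int)
        then PySem.List.pyGetD (pvVotes l1 l2 (min (last + 1) (l2.length : Int))) s 0
        else PySem.List.pyGetD (pvVotes l1 l2 (min (last + 1) (l2.length : Int))) 0 0)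

def calculate_best_shift_alt (sequence1 : String) (sequence2 : String) (max_shift : Int) :
    Int × Int × String × List String :=
  let l1 := sequence1.toList
  let l2 := sequence2.toList
  let last := if max_shift > 0 then max_shift else 0
  let mlist := pvMatchList l1 l2 last
  let bestM := (PySem.List.max? mlist (fun y => y)).getD 0
  let fin := ((PySem.List.pyRange 0 (last + 1) 1).foldl (pvStepB l1 l2 mlist bestM) none).getD
    (0, 0, [], [])
  (fin.1, fin.2.1, String.ofList fin.2.2.1, fin.2.2.2.map String.ofList)

-- ===== PRECONDITION & SPEC =====
def Spec_calculate_best_shift (sequence1 : String) (sequence2 : String) (max_shift : Int) (out : Int × Int × String × List String) : Prop := out = calculate_best_shift_alt sequence1 sequence2 max_shift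
instance (sequence1 : String) (sequence2 : String) (max_shift : Int) (out : Int × Int × String × List String) : Decidable (Spec_calculate_best_shift sequence1 sequence2 max_shift out) := by unfold Spec_calculate_best_shift; infer_instance

-- ===== CLAIM (what is proved, stated in full; the proofs are below) =====
def Claim_equal_calculate_best_shift : Prop := ∀ (sequence1 : String) (sequence2 : String) (max_shift : Int), Dom_calculate_best_shift sequence1 sequence2 max_shift → Spec_calculate_best_shift sequence1 sequence2 max_shift (calculate_best_shift sequence1 sequence2 max_shift)

-- ===== LEMMAS AND PROOFS =====

-- ---- A's run identification = B's back-to-front run builder ----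

-- glue a pending chain onto the runs of the remaining pairs
def pvGlue (chain : List Char) (st : List (List Char) × Bool) : List (List Char) :=
  if chain = [] then st.1 else
  match st with
  | (c :: cs, true) => (chain ++ c) :: cs
  | (out, _) => chain :: out

theorem pvIdent_eq_glue (l : List (Char × Char)) :
    ∀ (acc : List (List Char)) (chain : List Char),
    (let st := l.foldl pvIdentStep (acc, chain);
     if st.2 ≠ [] then st.1 ++ [st.2] else st.1) = acc ++ pvGlue chain (pvRunsAux l) := by
  induction l with
  | nil =>
    intro acc chain
    by_cases h : chain = [] <;> simp [pvGlue, pvRunsAux, h]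
  | cons p t ih =>
    intro acc chain
    by_cases hp : p.1 = p.2
    · have h1 : List.foldl pvIdentStep (acc, chain) (p :: t)
          = List.foldl pvIdentStep (acc, chain ++ [p.1]) t := by
        simp [List.foldl, pvIdentStep, hp]
      simp only [h1]
      rw [ih acc (chain ++ [p.1])]
      rcases hr : pvRunsAux t with ⟨out, prev⟩
      cases prev with
      | true =>
        cases out with
        | nil =>
          simp [pvGlue, pvRunsAux, hr, hp]
        | cons c cs =>
          by_cases hc : chain = [] <;>
            simp [pvGlue, pvRunsAux, hr, hp, hc]
      | false =>
        by_cases hc : chain = [] <;>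
          simp [pvGlue, pvRunsAux, hr, hp, hc]
    · have hrl : pvRunsAux (p :: t) = ((pvRunsAux t).1, false) := by
        simp [pvRunsAux, hp]
      by_cases hc : chain = []
      · subst hc
        have h1 : List.foldl pvIdentStep (acc, ([] : List Char)) (p :: t)
            = List.foldl pvIdentStep (acc, []) t := by
          rw [List.foldl_cons]
          congr 1
          simp [pvIdentStep, hp]
        simp only [h1]
        rw [ih acc []]
        rcases hr : pvRunsAux t with ⟨out, prev⟩
        simp [pvGlue, hrl, hr]
      · have h1 : List.foldl pvIdentStep (acc, chain) (p :: t)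
            = List.foldl pvIdentStep (acc ++ [chain], []) t := by
          rw [List.foldl_cons]
          congr 1
          simp [pvIdentStep, hp, hc]
        simp only [h1]
        rw [ih (acc ++ [chain]) []]
        rcases hr : pvRunsAux t with ⟨out, prev⟩
        simp [pvGlue, hrl, hr, hc]

theorem pvIdentify_eq_runs (l : List (Char × Char)) : pvIdentify l = (pvRunsAux l).1 := by
  have := pvIdent_eq_glue l [] []
  simpa [pvIdentify, pvGlue] using this

-- ---- match counting: zip scan = modular-index count ----

-- the number of i < min(len1, len2) with l1[i] == l2[(i - r) % len2]
def pvSig (l1 l2 : List Char) (r : Int) : Int :=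
  ((List.range (min l1.length l2.length)).countP
    (fun (i : Nat) => decide ((PySem.List.pyGet? l1 (i : Int)).getD ' '
      = (PySem.List.pyGet? l2 (PySem.Int.mod ((i : Int) - r) (l2.length : Int))).getD ' ')) : Nat)

theorem pvCM_countP (l : List (Char × Char)) :
    pvCountMatches l = ((l.countP (fun p => decide (p.1 = p.2))) : Nat) := by
  have := PySem.List.foldl_count_if (fun (p : Char × Char) => decide (p.1 = p.2)) l 0
  simpa [pvCountMatches] using this

theorem pvZip_countP : ∀ (l1 w : List Char),
    (l1.zip w).countP (fun p => decide (p.1 = p.2))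
    = (List.range (min l1.length w.length)).countP
        (fun i => decide (l1.getD i ' ' = w.getD i ' ')) := by
  intro l1
  induction l1 with
  | nil => intro w; simp
  | cons a t ih =>
    intro w
    cases w with
    | nil => simp
    | cons b u =>
      have hmin : min (t.length + 1) (u.length + 1) = min t.length u.length + 1 := by omega
      simp only [List.zip_cons_cons, List.countP_cons, List.length_cons, hmin,
        List.range_succ_eq_map, List.countP_cons, List.countP_map]
      rw [ih u]
      simp only [Function.comp_def, List.getD_cons_succ, List.getD_cons_zero]

-- a%n for a in [-n,0) (omega does not know emod with a variable divisor)
theorem pvEmodLow (x n : Int) (h1 : -n ≤ x) (h2 : x < 0) : x % n = x + n := by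
  have h3 : (x + n * 1) % n = x % n := Int.add_mul_emod_self_left x n 1
  have h4 : (x + n) % n = x + n := Int.emod_eq_of_lt (by omega) (by omega)
  calc x % n = (x + n * 1) % n := h3.symm
    _ = x + n := by rw [mul_one, h4]

-- index arithmetic of Python's rotation sequence2[-s:] + sequence2[:-s]
theorem pvShifted_getD (l2 : List Char) (s : Int) (hs : 1 ≤ s) (i : Nat) (hi : i < l2.length) :
    (PySem.List.slice l2 (some (-s)) none ++ PySem.List.slice l2 none (some (-s))).getD i ' '
    = (PySem.List.pyGet? l2 (PySem.Int.mod ((i : Int) - (if s < (l2.length : Int) then s else 0))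
        (l2.length : Int))).getD ' ' := by
  have hcast : s = (s.toNat : Int) := (Int.toNat_of_nonneg (by omega)).symm
  rw [hcast, PySem.List.slice_from_neg_natCast l2 s.toNat (by omega),
    PySem.List.slice_to_neg_natCast l2 s.toNat (by omega)]
  rw [PySem.Int.mod_eq_emod_of_pos (by exact_mod_cast (by omega : 0 < l2.length))]
  have hq : ∀ r : Int, 0 ≤ ((i:Int) - r) % (l2.length:Int) := by
    intro r
    have : (0:Int) < (l2.length:Int) := by exact_mod_cast (by omega : 0 < l2.length)
    exact Int.emod_nonneg _ this.ne'
  by_cases hlt : ((s.toNat : Int) < (l2.length : Int))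
  · rw [if_pos hlt]
    rw [PySem.List.pyGet?_of_nonneg l2 (hq _)]
    rw [List.getD_eq_getElem?_getD, List.getElem?_append, List.length_drop]
    by_cases hcase : i < l2.length - (l2.length - s.toNat)
    · rw [if_pos hcase, List.getElem?_drop]
      have : l2.length - s.toNat + i = (((i:Int) - (s.toNat:Int)) % (l2.length:Int)).toNat := by
        rw [pvEmodLow _ _ (by omega) (by omega)]
        omega
      rw [this]
    · rw [if_neg hcase, List.getElem?_take, if_pos (by omega)]
      have : i - (l2.length - (l2.length - s.toNat))
          = (((i:Int) - (s.toNat:Int)) % (l2.length:Int)).toNat := by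
        rw [Int.emod_eq_of_lt (by omega) (by omega)]
        omega
      rw [this]
  · rw [if_neg hlt]
    rw [PySem.List.pyGet?_of_nonneg l2 (hq _)]
    rw [List.getD_eq_getElem?_getD, List.getElem?_append, List.length_drop]
    rw [if_pos (by omega), List.getElem?_drop]
    have : l2.length - s.toNat + i = (((i:Int) - 0) % (l2.length:Int)).toNat := by
      rw [Int.emod_eq_of_lt (by omega) (by omega)]
      omega
    rw [this]

theorem pvShifted_len (l2 : List Char) (s : Int) (hs : 1 ≤ s) :
    (PySem.List.slice l2 (some (-s)) none ++ PySem.List.slice l2 none (some (-s))).length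
      = l2.length := by
  have hcast : s = (s.toNat : Int) := (Int.toNat_of_nonneg (by omega)).symm
  rw [hcast, PySem.List.slice_from_neg_natCast l2 s.toNat (by omega),
    PySem.List.slice_to_neg_natCast l2 s.toNat (by omega)]
  simp

-- A's per-shift count, for s ≥ 1, is the modular count at the clamped residue
theorem pvCM_shift (l1 l2 : List Char) (s : Int) (hs : 1 ≤ s) :
    pvCountMatches (l1.zip (PySem.List.slice l2 (some (-s)) none
        ++ PySem.List.slice l2 none (some (-s))))
    = pvSig l1 l2 (if s < (l2.length : Int) then s else 0) := by
  rw [pvCM_countP, pvZip_countP, pvShifted_len l2 s hs]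
  unfold pvSig
  congr 1
  apply List.countP_congr
  intro i hi
  simp only [List.mem_range] at hi
  have h := pvShifted_getD l2 s hs i (by omega)
  simp only [decide_eq_true_eq]
  rw [h, List.getD_eq_getElem?_getD, PySem.List.pyGet?_natCast]

theorem pvCM_zero (l1 l2 : List Char) (hn : 0 < l2.length) :
    pvCountMatches (l1.zip l2) = pvSig l1 l2 0 := by
  rw [pvCM_countP, pvZip_countP]
  unfold pvSig
  congr 1
  apply List.countP_congr
  intro i hi
  simp only [List.mem_range] at hi
  simp only [decide_eq_true_eq]
  have hm : PySem.Int.mod ((i:Int) - 0) (l2.length:Int) = (i:Int) := by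
    rw [PySem.Int.mod_eq_emod_of_pos (by exact_mod_cast hn), sub_zero,
      Int.emod_eq_of_lt (by omega) (by exact_mod_cast (by omega : i < l2.length))]
  rw [hm, List.getD_eq_getElem?_getD, List.getD_eq_getElem?_getD,
    PySem.List.pyGet?_natCast, PySem.List.pyGet?_natCast]

-- ---- the vote pass computes pvSig ----

theorem pvIncr_length (P : Int → Prop) [DecidablePred P] (R : List Int) (v : List Int) :
    (R.foldl (fun v r => if P r then PySem.List.pySetD v r (PySem.List.pyGetD v r 0 + 1) else v)
      v).length = v.length := by
  induction R generalizing v with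
  | nil => rfl
  | cons r t ih =>
    rw [List.foldl_cons]
    by_cases h : P r
    · rw [if_pos h, ih, PySem.List.length_pySetD]
    · rw [if_neg h, ih]

theorem pvIncr_getD (P : Int → Prop) [DecidablePred P] : ∀ (R : List Int) (v : List Int) (q : Nat),
    q < v.length → (∀ r ∈ R, 0 ≤ r ∧ r.toNat < v.length) →
    PySem.List.pyGetD
      (R.foldl (fun v r => if P r then PySem.List.pySetD v r (PySem.List.pyGetD v r 0 + 1) else v) v)
      (q : Int) 0
    = PySem.List.pyGetD v (q : Int) 0
      + (((R.filter (fun r => decide (P r))).count (q : Int) : Nat) : Int) := by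
  intro R
  induction R with
  | nil => intro v q hq hR; simp
  | cons r t ih =>
    intro v q hq hR
    obtain ⟨hr0, hrl⟩ := hR r (by simp)
    have hRt : ∀ r' ∈ t, 0 ≤ r' ∧ r'.toNat < v.length := fun r' h => hR r' (by simp [h])
    rw [List.foldl_cons]
    by_cases hP : P r
    · rw [if_pos hP, List.filter_cons, if_pos (by simpa using hP)]
      have hcast : r = (r.toNat : Int) := (Int.toNat_of_nonneg hr0).symm
      have hlen : (PySem.List.pySetD v r (PySem.List.pyGetD v r 0 + 1)).length = v.length :=
        PySem.List.length_pySetD v r _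
      rw [ih _ q (by omega) (fun r' h => by have h2 := hRt r' h; exact ⟨h2.1, by rw [hlen]; exact h2.2⟩)]
      rw [hcast, PySem.List.pyGetD_pySetD_natCast v r.toNat q _ 0 hrl]
      rw [List.count_cons]
      by_cases hqr : q = r.toNat
      · rw [if_pos hqr, hqr]
        simp
        omega
      · have hbeq : ((r.toNat : Int) == (q:Int)) = false := by
          simp
          omega
        rw [if_neg hqr, hbeq]
        simp
    · rw [if_neg hP, List.filter_cons, if_neg (by simpa using hP)]
      exact ih v q hq hRt

theorem pvVotes_len (l1 l2 : List Char) (nres : Int) (R : List Int) (v : List Int) :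
    (R.foldl (fun v i =>
      let c := (PySem.List.pyGet? l1 i).getD ' '
      (PySem.List.pyRange 0 nres 1).foldl
        (fun v r =>
          if c = (PySem.List.pyGet? l2 (PySem.Int.mod (i - r) (l2.length : Int))).getD ' '
          then PySem.List.pySetD v r (PySem.List.pyGetD v r 0 + 1) else v)
        v) v).length = v.length := by
  induction R generalizing v with
  | nil => rfl
  | cons i t ih =>
    rw [List.foldl_cons, ih]
    exact pvIncr_length _ _ v

theorem pvVotes_fold (l1 l2 : List Char) (nres : Int) (q : Nat) (hq : (q : Int) < nres) :
    ∀ (m : Nat) (v : List Int), nres ≤ (v.length : Int) →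
    PySem.List.pyGetD
      ((PySem.List.pyRange 0 (m : Int) 1).foldl (fun v i =>
        let c := (PySem.List.pyGet? l1 i).getD ' '
        (PySem.List.pyRange 0 nres 1).foldl
          (fun v r =>
            if c = (PySem.List.pyGet? l2 (PySem.Int.mod (i - r) (l2.length : Int))).getD ' '
            then PySem.List.pySetD v r (PySem.List.pyGetD v r 0 + 1) else v)
          v) v)
      (q : Int) 0
    = PySem.List.pyGetD v (q : Int) 0
      + (((List.range m).countP
          (fun (i : Nat) => decide ((PySem.List.pyGet? l1 (i : Int)).getD ' '
            = (PySem.List.pyGet? l2 (PySem.Int.mod ((i : Int) - (q : Int))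
                (l2.length : Int))).getD ' ')) : Nat) : Int) := by
  intro m
  induction m with
  | zero =>
    intro v hv
    have h0 : PySem.List.pyRange 0 ((0:Nat):Int) 1 = [] :=
      PySem.List.pyRange_one_eq_nil (by simp)
    rw [h0]
    simp
  | succ m ih =>
    intro v hv
    have hsplit : PySem.List.pyRange 0 ((m:Int) + 1) 1
        = PySem.List.pyRange 0 (m:Int) 1 ++ [(m:Int)] :=
      PySem.List.pyRange_one_succ_right (by omega)
    rw [show (((m+1 : Nat)):Int) = (m:Int)+1 by push_cast; ring, hsplit, List.foldl_append]
    rw [List.foldl_cons, List.foldl_nil]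
    have hlen : (List.foldl (fun v i =>
        let c := (PySem.List.pyGet? l1 i).getD ' '
        (PySem.List.pyRange 0 nres 1).foldl
          (fun v r =>
            if c = (PySem.List.pyGet? l2 (PySem.Int.mod (i - r) (l2.length : Int))).getD ' '
            then PySem.List.pySetD v r (PySem.List.pyGetD v r 0 + 1) else v)
          v) v (PySem.List.pyRange 0 (m:Int) 1)).length = v.length :=
      pvVotes_len l1 l2 nres _ v
    have hstep := pvIncr_getD
      (fun r => (PySem.List.pyGet? l1 (m:Int)).getD ' '
        = (PySem.List.pyGet? l2 (PySem.Int.mod ((m:Int) - r) (l2.length : Int))).getD ' ')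
      (PySem.List.pyRange 0 nres 1)
      (List.foldl (fun v i =>
        let c := (PySem.List.pyGet? l1 i).getD ' '
        (PySem.List.pyRange 0 nres 1).foldl
          (fun v r =>
            if c = (PySem.List.pyGet? l2 (PySem.Int.mod (i - r) (l2.length : Int))).getD ' '
            then PySem.List.pySetD v r (PySem.List.pyGetD v r 0 + 1) else v)
          v) v (PySem.List.pyRange 0 (m:Int) 1))
      q (by rw [hlen]; omega)
      (by
        intro r hr
        rw [PySem.List.mem_pyRange_one] at hr
        exact ⟨hr.1, by rw [hlen]; omega⟩)
    rw [hstep, ih v hv]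
    rw [List.range_succ, List.countP_append]
    have hcount : ((PySem.List.pyRange 0 nres 1).filter
        (fun r => decide ((PySem.List.pyGet? l1 (m:Int)).getD ' '
          = (PySem.List.pyGet? l2 (PySem.Int.mod ((m:Int) - r) (l2.length : Int))).getD ' '))).count (q:Int)
        = if ((PySem.List.pyGet? l1 (m:Int)).getD ' '
            = (PySem.List.pyGet? l2 (PySem.Int.mod ((m:Int) - (q:Int)) (l2.length : Int))).getD ' ')
          then 1 else 0 := by
      by_cases hP : ((PySem.List.pyGet? l1 (m:Int)).getD ' '
          = (PySem.List.pyGet? l2 (PySem.Int.mod ((m:Int) - (q:Int)) (l2.length : Int))).getD ' ')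
      · rw [if_pos hP, List.count_filter (by simpa using hP)]
        exact List.count_eq_one_of_mem (PySem.List.nodup_pyRange_one 0 nres)
          (PySem.List.mem_pyRange_one.mpr ⟨by omega, hq⟩)
      · rw [if_neg hP, List.count_eq_zero]
        intro hmem
        rw [List.mem_filter] at hmem
        exact hP (by simpa using hmem.2)
    rw [hcount]
    simp only [List.countP_cons, List.countP_nil]
    by_cases hP : ((PySem.List.pyGet? l1 (m:Int)).getD ' '
        = (PySem.List.pyGet? l2 (PySem.Int.mod ((m:Int) - (q:Int)) (l2.length : Int))).getD ' ')
    · rw [if_pos hP]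
      simp only [hP, decide_true]
      push_cast
      ring
    · rw [if_neg hP]
      simp only [hP, decide_false]
      push_cast
      ring

theorem pvVotes_getD (l1 l2 : List Char) (nres : Int)
    (q : Nat) (hq : (q : Int) < nres) :
    PySem.List.pyGetD (pvVotes l1 l2 nres) (q : Int) 0 = pvSig l1 l2 (q : Int) := by
  unfold pvVotes pvSig
  have hmin : (min (l1.length : Int) (l2.length : Int)) = ((min l1.length l2.length : Nat) : Int) := by
    omega
  rw [hmin]
  rw [pvVotes_fold l1 l2 nres q hq (min l1.length l2.length) _
    (by rw [List.length_replicate]; omega)]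
  have hinit : PySem.List.pyGetD (List.replicate nres.toNat (0:Int)) (q : Int) 0 = 0 := by
    rw [PySem.List.pyGetD_natCast]
    rw [List.getD_eq_getElem?_getD, List.getElem?_replicate]
    split <;> rfl
  rw [hinit, zero_add]

-- ---- the two selection loops agree ----

theorem pvStepB_skip (l1 l2 : List Char) (mlist : List Int) (M : Int)
    (b : Option (Int × Int × List Char × List (List Char))) (s : Int)
    (hne : PySem.List.pyGetD mlist s 0 ≠ M) : pvStepB l1 l2 mlist M b s = b := by
  simp [pvStepB, hne]

theorem pvStepB_go_none (l1 l2 : List Char) (mlist : List Int) (M : Int) (s : Int)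
    (heq : PySem.List.pyGetD mlist s 0 = M) :
    pvStepB l1 l2 mlist M none s
      = some (s, M,
          PySem.List.maxD (pvIdentify (l1.zip (PySem.List.slice l2 (some (-s)) none
            ++ PySem.List.slice l2 none (some (-s))))) List.length [],
          pvIdentify (l1.zip (PySem.List.slice l2 (some (-s)) none
            ++ PySem.List.slice l2 none (some (-s))))) := by
  rw [pvIdentify_eq_runs]
  simp [pvStepB, heq]

theorem pvStepB_go_some (l1 l2 : List Char) (mlist : List Int) (M : Int) (s : Int)
    (x : Int × Int × List Char × List (List Char))
    (heq : PySem.List.pyGetD mlist s 0 = M) :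
    pvStepB l1 l2 mlist M (some x) s
      = if (PySem.List.maxD (pvIdentify (l1.zip (PySem.List.slice l2 (some (-s)) none
            ++ PySem.List.slice l2 none (some (-s))))) List.length []).length > x.2.2.1.length
        then some (s, M,
          PySem.List.maxD (pvIdentify (l1.zip (PySem.List.slice l2 (some (-s)) none
            ++ PySem.List.slice l2 none (some (-s))))) List.length [],
          pvIdentify (l1.zip (PySem.List.slice l2 (some (-s)) none
            ++ PySem.List.slice l2 none (some (-s)))))
        else some x := by
  rw [pvIdentify_eq_runs]
  simp [pvStepB, heq]

theorem pvStepA_eval (l1 l2 : List Char) (a : Int × Int × List Char × List (List Char)) (s : Int) :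
    pvStepA l1 l2 a s
      = (if pvCountMatches (l1.zip (PySem.List.slice l2 (some (-s)) none
            ++ PySem.List.slice l2 none (some (-s)))) > a.2.1
          ∨ (pvCountMatches (l1.zip (PySem.List.slice l2 (some (-s)) none
            ++ PySem.List.slice l2 none (some (-s)))) = a.2.1
            ∧ (PySem.List.maxD (pvIdentify (l1.zip (PySem.List.slice l2 (some (-s)) none
                ++ PySem.List.slice l2 none (some (-s))))) List.length []).length
              > a.2.2.1.length)
        then (s,
          pvCountMatches (l1.zip (PySem.List.slice l2 (some (-s)) none
            ++ PySem.List.slice l2 none (some (-s)))),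
          PySem.List.maxD (pvIdentify (l1.zip (PySem.List.slice l2 (some (-s)) none
            ++ PySem.List.slice l2 none (some (-s))))) List.length [],
          pvIdentify (l1.zip (PySem.List.slice l2 (some (-s)) none
            ++ PySem.List.slice l2 none (some (-s)))))
        else a) := rfl

theorem pvSim (l1 l2 : List Char) (mlist : List Int) (M : Int) :
    ∀ (R : List Int) (a : Int × Int × List Char × List (List Char))
      (b : Option (Int × Int × List Char × List (List Char))),
    (∀ s ∈ R, PySem.List.pyGetD mlist s 0
        = pvCountMatches (l1.zip (PySem.List.slice l2 (some (-s)) none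
            ++ PySem.List.slice l2 none (some (-s))))) →
    (∀ s ∈ R, PySem.List.pyGetD mlist s 0 ≤ M) →
    a.2.1 ≤ M →
    (a.2.1 = M → b = some a) →
    (a.2.1 < M → b = none) →
    (a.2.1 = M ∨ ∃ s ∈ R, PySem.List.pyGetD mlist s 0 = M) →
    R.foldl (pvStepB l1 l2 mlist M) b = some (R.foldl (pvStepA l1 l2) a) := by
  intro R
  induction R with
  | nil =>
    intro a b h1 h2 h3 h4 h5 h6
    have ha : a.2.1 = M := by
      rcases h6 with h | ⟨s, hs, _⟩
      · exact h
      · simp at hs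
    simpa using h4 ha
  | cons s t ih =>
    intro a b h1 h2 h3 h4 h5 h6
    rw [List.foldl_cons, List.foldl_cons]
    have hcm := h1 s (by simp)
    have hcmle := h2 s (by simp)
    have h1t : ∀ s' ∈ t, PySem.List.pyGetD mlist s' 0
        = pvCountMatches (l1.zip (PySem.List.slice l2 (some (-s')) none
            ++ PySem.List.slice l2 none (some (-s')))) := fun s' h => h1 s' (by simp [h])
    have h2t : ∀ s' ∈ t, PySem.List.pyGetD mlist s' 0 ≤ M := fun s' h => h2 s' (by simp [h])
    by_cases hM : PySem.List.pyGetD mlist s 0 = M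
    · -- candidate shift: both loops inspect it
      rw [hM] at hcm
      by_cases haM : a.2.1 = M
      · rw [h4 haM, pvStepB_go_some l1 l2 mlist M s a hM, pvStepA_eval, ← hcm]
        by_cases hlen : (PySem.List.maxD (pvIdentify (l1.zip (PySem.List.slice l2 (some (-s)) none
            ++ PySem.List.slice l2 none (some (-s))))) List.length []).length > a.2.2.1.length
        · rw [if_pos hlen, if_pos (Or.inr ⟨haM.symm, hlen⟩)]
          exact ih _ _ h1t h2t (le_refl M) (fun _ => rfl)
            (fun h => absurd h (lt_irrefl M)) (Or.inl rfl)
        · rw [if_neg hlen, if_neg (by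
            intro hc
            rcases hc with hc | ⟨_, hc⟩
            · rw [haM] at hc; exact lt_irrefl M hc
            · exact hlen hc)]
          exact ih a (some a) h1t h2t h3 (fun _ => rfl)
            (fun h => absurd haM (ne_of_lt h)) (Or.inl haM)
      · have haMlt : a.2.1 < M := lt_of_le_of_ne h3 haM
        rw [h5 haMlt, pvStepB_go_none l1 l2 mlist M s hM, pvStepA_eval, ← hcm]
        rw [if_pos (Or.inl haMlt)]
        exact ih _ _ h1t h2t (le_refl M) (fun _ => rfl)
          (fun h => absurd h (lt_irrefl M)) (Or.inl rfl)
    · -- non-candidate shift: B skips it, and A cannot reach M on it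
      have hcmlt : PySem.List.pyGetD mlist s 0 < M := lt_of_le_of_ne hcmle hM
      rw [pvStepB_skip l1 l2 mlist M b s hM, pvStepA_eval, ← hcm]
      by_cases haM : a.2.1 = M
      · rw [if_neg (by
          intro hc
          rcases hc with hc | ⟨hc, _⟩
          · rw [haM] at hc; omega
          · rw [haM] at hc; omega)]
        exact ih a b h1t h2t h3 h4 h5 (Or.inl haM)
      · have haMlt : a.2.1 < M := lt_of_le_of_ne h3 haM
        rw [h5 haMlt]
        have h6t : ∃ s' ∈ t, PySem.List.pyGetD mlist s' 0 = M := by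
          rcases h6 with h | ⟨s', hs', hf⟩
          · exact absurd h haM
          · rcases List.mem_cons.mp hs' with rfl | hmem
            · exact absurd hf hM
            · exact ⟨s', hmem, hf⟩
        by_cases hc : (PySem.List.pyGetD mlist s 0 > a.2.1
            ∨ (PySem.List.pyGetD mlist s 0 = a.2.1
              ∧ (PySem.List.maxD (pvIdentify (l1.zip (PySem.List.slice l2 (some (-s)) none
                  ++ PySem.List.slice l2 none (some (-s))))) List.length []).length
                > a.2.2.1.length))
        · rw [if_pos hc]
          exact ih _ none h1t h2t (le_of_lt hcmlt)
            (fun h => absurd h (ne_of_lt hcmlt)) (fun _ => rfl) (Or.inr h6t)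
        · rw [if_neg hc]
          exact ih a none h1t h2t h3
            (fun h => absurd h haM) (fun _ => rfl) (Or.inr h6t)
-- ---- assembling the main theorem ----

theorem pvShift0 (l2 : List Char) :
    PySem.List.slice l2 (some (-(0:Int))) none ++ PySem.List.slice l2 none (some (-(0:Int))) = l2 := by
  rw [show (-(0:Int)) = ((0:Nat):Int) by norm_num]
  rw [PySem.List.slice_from_natCast, PySem.List.slice_to_natCast]
  simp

theorem pvShiftNil (s : Int) (hs : 1 ≤ s) :
    PySem.List.slice ([] : List Char) (some (-s)) none
      ++ PySem.List.slice ([] : List Char) none (some (-s)) = [] := by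
  have := pvShifted_len [] s hs
  exact List.length_eq_zero_iff.mp this

theorem pvMatchList_len (l1 l2 : List Char) (last : Int) :
    (pvMatchList l1 l2 last).length = (last + 1).toNat := by
  unfold pvMatchList
  split
  · simp
  · simp [PySem.List.length_pyRange_one]

theorem pvLookup (l1 l2 : List Char) (last : Int) (hl : 0 ≤ last)
    (s : Int) (h0 : 0 ≤ s) (h1 : s < last + 1) :
    PySem.List.pyGetD (pvMatchList l1 l2 last) s 0
      = pvCountMatches (l1.zip (PySem.List.slice l2 (some (-s)) none
          ++ PySem.List.slice l2 none (some (-s)))) := by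
  unfold pvMatchList
  by_cases hn2 : (l2.length : Int) = 0
  · rw [if_pos hn2]
    have hl2 : l2 = [] := by
      have : l2.length = 0 := by omega
      exact List.length_eq_zero_iff.mp this
    have hsh : (PySem.List.slice l2 (some (-s)) none
        ++ PySem.List.slice l2 none (some (-s))) = [] := by
      subst hl2
      by_cases hs0 : s = 0
      · subst hs0; rw [pvShift0]
      · exact pvShiftNil s (by omega)
    rw [hsh, List.zip_nil_right]
    have hcast : s = (s.toNat : Int) := (Int.toNat_of_nonneg h0).symm
    rw [hcast, PySem.List.pyGetD_natCast, List.getD_eq_getElem?_getD, List.getElem?_replicate]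
    split <;> simp [pvCountMatches]
  · rw [if_neg hn2]
    have hn2p : 0 < l2.length := by omega
    rw [PySem.List.pyGetD_map_pyRange_of_nonneg _ (last + 1) s 0 h0 h1]
    have hnres1 : (1:Int) ≤ min (last + 1) (l2.length : Int) := by omega
    by_cases hlt : s < (l2.length : Int)
    · rw [if_pos hlt]
      have hcast : s = (s.toNat : Int) := (Int.toNat_of_nonneg h0).symm
      rw [hcast, pvVotes_getD l1 l2 _ s.toNat (by omega)]
      by_cases hs0 : s = 0
      · have hz : ((s.toNat : Int)) = 0 := by omega
        rw [hz, pvShift0, pvCM_zero l1 l2 hn2p]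
      · have hs1 : (1:Int) ≤ (s.toNat : Int) := by omega
        rw [pvCM_shift l1 l2 _ hs1, if_pos (by omega : ((s.toNat:Int)) < (l2.length : Int))]
    · rw [if_neg hlt]
      have hs1 : 1 ≤ s := by omega
      have h00 := pvVotes_getD l1 l2 (min (last + 1) (l2.length : Int)) 0 (by push_cast; omega)
      push_cast at h00
      rw [h00, pvCM_shift l1 l2 s hs1, if_neg hlt]

-- ===== VERDICT (by name: the statement is the Claim_ definition above) =====
theorem calculate_best_shift_spec : Claim_equal_calculate_best_shift := by
  intro s1 s2 max_shift _
  unfold Spec_calculate_best_shift calculate_best_shift calculate_best_shift_alt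
  dsimp only
  set l1 := s1.toList with hl1
  set l2 := s2.toList with hl2
  set last := (if max_shift > 0 then max_shift else 0 : Int) with hlast
  have hlast0 : 0 ≤ last := by rw [hlast]; split <;> omega
  set mlist := pvMatchList l1 l2 last with hml
  have hmlLen : mlist.length = (last + 1).toNat := pvMatchList_len l1 l2 last
  obtain ⟨v, hv⟩ : ∃ v, PySem.List.max? mlist (fun y => y) = some v := by
    cases h : PySem.List.max? mlist (fun y => y) with
    | none =>
      exfalso
      have := (PySem.List.max?_eq_none_iff mlist (fun y => y)).mp h
      rw [this] at hmlLen
      simp at hmlLen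
      omega
    | some v => exact ⟨v, rfl⟩
  have hmem : v ∈ mlist := PySem.List.max?_mem hv
  have hmax : ∀ x ∈ mlist, x ≤ v := fun x hx => PySem.List.max?_isMax hv x hx
  rw [hv]
  simp only [Option.getD_some]
  have hlk := pvLookup l1 l2 last hlast0
  have hle : ∀ s : Int, 0 ≤ s → s < last + 1 → PySem.List.pyGetD mlist s 0 ≤ v := by
    intro s h0 h1
    exact hmax _ (PySem.List.pyGetD_mem mlist 0 ⟨by omega, by omega⟩)
  have hex : ∃ s : Int, (0 ≤ s ∧ s < last + 1) ∧ PySem.List.pyGetD mlist s 0 = v := by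
    obtain ⟨k, hk, hkv⟩ := List.mem_iff_getElem.mp hmem
    refine ⟨(k : Int), ⟨by omega, by omega⟩, ?_⟩
    rw [PySem.List.pyGetD_natCast, List.getD_eq_getElem?_getD, List.getElem?_eq_getElem hk]
    simpa using hkv
  have hrangeA : PySem.List.pyRange 1 (max_shift + 1) 1 = PySem.List.pyRange 1 (last + 1) 1 := by
    rw [hlast]
    by_cases h : max_shift > 0
    · rw [if_pos h]
    · rw [if_neg h, PySem.List.pyRange_one_eq_nil (by omega),
        PySem.List.pyRange_one_eq_nil (by omega)]
  have hrangeB : PySem.List.pyRange 0 (last + 1) 1 = 0 :: PySem.List.pyRange 1 (last + 1) 1 :=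
    PySem.List.pyRange_one_cons (by omega)
  have hsimArgs : (∀ s ∈ PySem.List.pyRange 1 (last + 1) 1, PySem.List.pyGetD mlist s 0
        = pvCountMatches (l1.zip (PySem.List.slice l2 (some (-s)) none
            ++ PySem.List.slice l2 none (some (-s)))))
      ∧ (∀ s ∈ PySem.List.pyRange 1 (last + 1) 1, PySem.List.pyGetD mlist s 0 ≤ v) := by
    constructor
    · intro s hs
      rw [PySem.List.mem_pyRange_one] at hs
      exact hlk s (by omega) (by omega)
    · intro s hs
      rw [PySem.List.mem_pyRange_one] at hs
      exact hle s (by omega) (by omega)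
  have hlk0 : PySem.List.pyGetD mlist 0 0 = pvCountMatches (l1.zip l2) := by
    have h := hlk 0 le_rfl (by omega)
    rw [pvShift0] at h
    exact h
  have hfold : (PySem.List.pyRange 0 (last + 1) 1).foldl (pvStepB l1 l2 mlist v) none
      = some ((PySem.List.pyRange 1 (last + 1) 1).foldl (pvStepA l1 l2)
          (0, pvCountMatches (l1.zip l2),
            PySem.List.maxD (pvIdentify (l1.zip l2)) List.length [],
            pvIdentify (l1.zip l2))) := by
    rw [hrangeB, List.foldl_cons]
    by_cases h0M : PySem.List.pyGetD mlist 0 0 = v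
    · rw [pvStepB_go_none l1 l2 mlist v 0 h0M, pvShift0]
      have hbm : pvCountMatches (l1.zip l2) = v := by rw [← hlk0, h0M]
      rw [hbm]
      exact pvSim l1 l2 mlist v _ _ _ hsimArgs.1 hsimArgs.2 le_rfl (fun _ => rfl)
        (fun h => absurd h (lt_irrefl v)) (Or.inl rfl)
    · rw [pvStepB_skip l1 l2 mlist v none 0 h0M]
      have h0lt : PySem.List.pyGetD mlist 0 0 < v :=
        lt_of_le_of_ne (hle 0 le_rfl (by omega)) h0M
      have hbmlt : pvCountMatches (l1.zip l2) < v := by rw [← hlk0]; exact h0lt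
      refine pvSim l1 l2 mlist v _ _ _ hsimArgs.1 hsimArgs.2 (le_of_lt hbmlt)
        (fun h => absurd h (ne_of_lt hbmlt)) (fun _ => rfl) (Or.inr ?_)
      obtain ⟨sw, ⟨hsw0, hsw1⟩, hswv⟩ := hex
      have hswne : sw ≠ 0 := by
        intro h
        rw [h] at hswv
        exact h0M hswv
      exact ⟨sw, PySem.List.mem_pyRange_one.mpr ⟨by omega, hsw1⟩, hswv⟩
  rw [hrangeA, hfold]
  simp
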